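-- pv_equiv track=rewrite | github.com/olga3n/adventofcode | 2022/day_06_tuning_trouble_2.py | first_marker
-- ===== SOURCE A (Python) =====
-- from typing import Dict
--
-- def first_marker(line: str, uniq_size: int = 14) -> int:
--     freq: Dict[str, int] = {}
--
--     for i in range(len(line)):
--         freq[line[i]] = freq.get(line[i], 0) + 1
--         if i >= uniq_size:
--             prev_symbol = line[i - uniq_size]
--             freq[prev_symbol] -= 1
--             if freq[prev_symbol] == 0:
--                 freq.pop(prev_symbol)
--         if len(freq) == uniq_size:
--             return i + 1
--
--     return 0
-- ===== SOURCE B (Python) =====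
-- def first_marker(line: str, uniq_size: int = 14) -> int:
--     for i in range(uniq_size - 1, len(line)):
--         if len(set(line[i - uniq_size + 1:i + 1])) == uniq_size:
--             return i + 1
--     return 0
-- ===== Notes on version B (the rewrite author's own statement) =====
-- stated objective: simpler
-- what changed: A maintains a sliding frequency dict incrementally (add new char, decrement/pop the char leaving the window, compare dict size); B re-scans each length-uniq_size window independently and tests len(set(window)) == uniq_size, with no mutable state carried between iterations.
-- outside the precondition, e.g. on first_marker('ab', 0): A returns 1, B returns 0; on first_marker('ab', -1): A raises KeyError, B returns 0
import Mathlib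
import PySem

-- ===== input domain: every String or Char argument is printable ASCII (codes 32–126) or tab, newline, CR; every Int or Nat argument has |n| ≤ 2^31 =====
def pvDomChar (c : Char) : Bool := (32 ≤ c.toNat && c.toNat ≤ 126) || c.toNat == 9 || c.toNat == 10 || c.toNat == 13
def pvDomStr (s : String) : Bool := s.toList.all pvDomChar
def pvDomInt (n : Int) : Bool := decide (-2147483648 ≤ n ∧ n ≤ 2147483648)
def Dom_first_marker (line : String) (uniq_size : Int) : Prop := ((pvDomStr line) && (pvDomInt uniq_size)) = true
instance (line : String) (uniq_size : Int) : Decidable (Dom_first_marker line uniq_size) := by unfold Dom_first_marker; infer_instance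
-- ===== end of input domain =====

-- B replaces A's incrementally maintained frequency dict with an independent
-- per-window distinctness test (len(set(window)) == uniq_size): simpler, not faster.

-- ===== PORT A =====
-- A's for-loop with early return; `none` marks where the Python raises
-- (IndexError on line[i - uniq_size], KeyError on freq[prev] -= 1), reachable only outside Pre_.
def firstMarkerLoopA (cs : List Char) (uniq_size : Int) : Nat → PySem.Dict Char Int → Int
  | i, freq =>
    if h : i < cs.length then
      -- freq[line[i]] = freq.get(line[i], 0) + 1
      let freq1 := freq.modify cs[i] 0 (· + 1)
      -- if i >= uniq_size: prev_symbol = line[i - uniq_size]; freq[prev_symbol] -= 1;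
      --                    if freq[prev_symbol] == 0: freq.pop(prev_symbol)
      let step : Option (PySem.Dict Char Int) :=
        if uniq_size ≤ (i : Int) then
          match PySem.List.pyGet? cs ((i : Int) - uniq_size) with
          | none => none
          | some prev =>
            match freq1.get? prev with
            | none => none
            | some v =>
              let f2 := freq1.insert prev (v - 1)
              some (if f2.getD prev 0 = 0 then f2.erase prev else f2)
        else some freq1
      match step with
      | none => 0
      | some f =>
        -- if len(freq) == uniq_size: return i + 1
        if (f.size : Int) = uniq_size then (i : Int) + 1 else firstMarkerLoopA cs uniq_size (i + 1) f
    else 0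
  termination_by i => cs.length - i
  decreasing_by omega

def first_marker (line : String) (uniq_size : Int) : Int :=
  firstMarkerLoopA line.toList uniq_size 0 PySem.Dict.empty

-- ===== PORT B =====
-- for i in range(uniq_size - 1, len(line)): if len(set(line[i-uniq_size+1:i+1])) == uniq_size: return i + 1
-- return 0
def first_marker_alt (line : String) (uniq_size : Int) : Int :=
  let cs := line.toList
  match (PySem.List.pyRange (uniq_size - 1) cs.length).find?
      (fun i => ((PySem.Set.ofList
          (PySem.List.slice cs (some (i - uniq_size + 1)) (some (i + 1)))).length : Int) == uniq_size) with
  | some i => i + 1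
  | none => 0

-- ===== PRECONDITION & SPEC =====
-- Pre_ excludes uniq_size ≤ 0: for uniq_size < 0 A raises (KeyError or IndexError) on every
-- non-empty line, and for uniq_size = 0 A's value 1 on a non-empty line and B's value 0 are both
-- defensible answers to a degenerate corner (the empty window is all-distinct) no one would specify.
def Pre_first_marker (line : String) (uniq_size : Int) : Prop := 1 ≤ uniq_size
instance (line : String) (uniq_size : Int) : Decidable (Pre_first_marker line uniq_size) := by
  unfold Pre_first_marker; infer_instance

def pvWitness_first_marker : String × Int := ("abcd", 3)

def Spec_first_marker (line : String) (uniq_size : Int) (out : Int) : Prop :=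
  out = first_marker_alt line uniq_size
instance (line : String) (uniq_size : Int) (out : Int) : Decidable (Spec_first_marker line uniq_size out) := by
  unfold Spec_first_marker; infer_instance

-- ===== CLAIM (what is proved, stated in full; the proofs are below) =====
def Claim_equal_first_marker : Prop := ∀ (line : String) (uniq_size : Int),
  Dom_first_marker line uniq_size → Pre_first_marker line uniq_size →
  Spec_first_marker line uniq_size (first_marker line uniq_size)

-- ===== LEMMAS AND PROOFS =====

-- The window of the last (at most) m characters among the first i.
def fmWin (cs : List Char) (m i : Nat) : List Char := (cs.take i).drop (i - m)

-- Semantic invariant tying A's freq dict to the current window.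
def fmInv (w : List Char) (d : PySem.Dict Char Int) : Prop :=
  d.keys.Nodup ∧ (∀ c, d.getD c 0 = (w.count c : Int)) ∧ (∀ c, d.contains c = true ↔ c ∈ w)

-- B's remaining search, starting at window-end index i.
def fmB (cs : List Char) (u : Int) (i m : Nat) : Int :=
  match (PySem.List.pyRange ((max (m - 1) i : Nat) : Int) cs.length).find?
      (fun j => ((PySem.Set.ofList
          (PySem.List.slice cs (some (j - u + 1)) (some (j + 1)))).length : Int) == u) with
  | some j => j + 1
  | none => 0

theorem find?_filter_ne {ν : Type} (l : List (Char × ν)) (k k' : Char) :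
    (l.filter (fun p => !(p.1 == k))).find? (fun p => p.1 == k') =
      if k' = k then none else l.find? (fun p => p.1 == k') := by
  induction l with
  | nil => simp
  | cons a t ih =>
    by_cases h3 : k' = k
    · subst h3
      by_cases h1 : a.1 = k' <;> simp [h1, ih]
    · by_cases h1 : a.1 = k
      · have h2 : ¬ a.1 = k' := by rw [h1]; exact fun h => h3 h.symm
        have h4 : (k == k') = false := beq_eq_false_iff_ne.mpr (fun h => h3 h.symm)
        simp [h1, h3, h4, ih]
      · by_cases h2 : a.1 = k' <;>
          simp [h1, h2, h3, ih]

theorem dict_get?_erase {ν : Type} (d : PySem.Dict Char ν) (k k' : Char) :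
    (d.erase k).get? k' = if k' = k then none else d.get? k' := by
  obtain ⟨items⟩ := d
  show ((items.filter (fun p : Char × ν => !(p.1 == k))).find? (fun p : Char × ν => p.1 == k')).map Prod.snd = _
  rw [find?_filter_ne]
  split <;> rfl

theorem dict_getD_erase {ν : Type} (d : PySem.Dict Char ν) (k k' : Char) (d0 : ν) :
    (d.erase k).getD k' d0 = if k' = k then d0 else d.getD k' d0 := by
  rw [PySem.Dict.getD_eq_get?_getD, dict_get?_erase]
  split
  · rfl
  · rw [PySem.Dict.getD_eq_get?_getD]

theorem dict_contains_erase {ν : Type} (d : PySem.Dict Char ν) (k k' : Char) :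
    ((d.erase k).contains k' = true) ↔ (k' ≠ k ∧ d.contains k' = true) := by
  rw [PySem.Dict.contains_eq_isSome_get?, PySem.Dict.contains_eq_isSome_get?, dict_get?_erase]
  split <;> simp_all

theorem dict_nodup_keys_erase {ν : Type} (d : PySem.Dict Char ν) (k : Char)
    (h : d.keys.Nodup) : (d.erase k).keys.Nodup := by
  obtain ⟨items⟩ := d
  have h' : (items.map Prod.fst).Nodup := h
  exact (((List.filter_sublist :
    (items.filter (fun p : Char × ν => !(p.1 == k))).Sublist items)).map Prod.fst).nodup h'

theorem fmInv_size (w : List Char) (d : PySem.Dict Char Int) (h : fmInv w d) :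
    d.size = (PySem.Set.ofList w).length := by
  obtain ⟨hnd, _hcnt, hmem⟩ := h
  have hperm : d.keys.Perm (PySem.Set.ofList w) := by
    rw [List.perm_ext_iff_of_nodup hnd (PySem.Set.nodup_ofList w)]
    intro a
    rw [← PySem.Dict.contains_iff_mem_keys, PySem.Set.mem_ofList, hmem]
  have hsz : d.size = d.keys.length := by
    show d.items.length = (d.items.map Prod.fst).length
    rw [List.length_map]
  rw [hsz, hperm.length_eq]

theorem set_ofList_length_le (w : List Char) : (PySem.Set.ofList w).length ≤ w.length :=
  (List.subperm_of_subset (PySem.Set.nodup_ofList w)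
    (fun _a ha => (PySem.Set.mem_ofList w _a).mp ha)).length_le

theorem fmInv_step (cs : List Char) (m i : Nat) (freq : PySem.Dict Char Int)
    (hi : i < cs.length) (hinv : fmInv (fmWin cs m i) freq) :
    fmInv (fmWin cs m i ++ [cs[i]]) (freq.modify cs[i] 0 (· + 1)) := by
  obtain ⟨hnd, hcnt, hmem⟩ := hinv
  refine ⟨?_, ?_, ?_⟩
  · rw [PySem.Dict.keys_modify]; exact PySem.Dict.nodup_keys_insert _ _ _ hnd
  · intro c
    rw [PySem.Dict.getD_modify]
    by_cases hc : c = cs[i]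
    · subst hc; simp [List.count_append]; exact hcnt _
    · rw [if_neg hc, hcnt c]
      have hone : List.count c (fmWin cs m i ++ [cs[i]]) = List.count c (fmWin cs m i) := by
        simp [List.count_append, Ne.symm hc]
      rw [hone]
  · intro c
    rw [PySem.Dict.contains_modify]
    by_cases hc : c = cs[i] <;> simp [hc, hmem c]

theorem fmWin_succ (cs : List Char) (m i : Nat) (hi : i < cs.length) :
    fmWin cs m i ++ [cs[i]] = (cs.take (i + 1)).drop (i - m) := by
  unfold fmWin
  rw [List.take_succ_eq_append_getElem hi,
      List.drop_append_of_le_length (by rw [List.length_take]; exact le_min (by omega) (by omega))]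

theorem fmWin_eq_slice (cs : List Char) (m i : Nat) (hm : m ≤ i + 1) :
    fmWin cs m (i + 1) = (cs.drop (i + 1 - m)).take m := by
  unfold fmWin
  rw [List.drop_take]
  congr 1
  omega

theorem fmWin_small (cs : List Char) (m i : Nat) (hm : i + 1 ≤ m) (hi : i < cs.length) :
    fmWin cs m (i + 1) = fmWin cs m i ++ [cs[i]] := by
  unfold fmWin
  rw [Nat.sub_eq_zero_of_le hm, Nat.sub_eq_zero_of_le (by omega), List.drop_zero,
      List.drop_zero, List.take_succ_eq_append_getElem hi]

theorem fmWin_mid (cs : List Char) (m i : Nat) (hm : m ≤ i) (hi : i < cs.length) :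
    (cs.take (i + 1)).drop (i - m) = cs[i - m] :: fmWin cs m (i + 1) := by
  rw [List.drop_eq_getElem_cons (by rw [List.length_take]; exact lt_min (by omega) (by omega))]
  congr 1
  · exact List.getElem_take
  · unfold fmWin
    congr 1
    omega

-- One iteration of A's loop: it preserves the invariant and exposes the size test.
theorem fmA_step (cs : List Char) (u : Int) (m : Nat) (hm : 1 ≤ m) (hu : u = (m : Int))
    (i : Nat) (freq : PySem.Dict Char Int) (hi : i < cs.length)
    (hinv : fmInv (fmWin cs m i) freq) :
    ∃ f, fmInv (fmWin cs m (i + 1)) f ∧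
      firstMarkerLoopA cs u i freq =
        (if (f.size : Int) = u then (i : Int) + 1 else firstMarkerLoopA cs u (i + 1) f) := by
  have hinv1 := fmInv_step cs m i freq hi hinv
  rw [firstMarkerLoopA]
  rw [dif_pos hi]
  dsimp only
  by_cases hcase : u ≤ (i : Int)
  · -- window is full: drop line[i - uniq_size]
    have him : m ≤ i := by omega
    have hidx : (i : Int) - u = ((i - m : Nat) : Int) := by rw [hu]; omega
    rw [if_pos hcase, hidx, PySem.List.pyGet?_natCast, List.getElem?_eq_getElem (by omega)]
    dsimp only
    have hwmid := fmWin_succ cs m i hi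
    have hmid := fmWin_mid cs m i him hi
    have hinv1' : fmInv (cs[i - m] :: fmWin cs m (i + 1)) (freq.modify cs[i] 0 (· + 1)) := by
      rw [hwmid, hmid] at hinv1; exact hinv1
    set freq1 := freq.modify cs[i] 0 (· + 1) with hfreq1
    have hcont : freq1.contains cs[i - m] = true := (hinv1'.2.2 _).mpr (List.mem_cons_self)
    rw [PySem.Dict.contains_eq_isSome_get?] at hcont
    obtain ⟨v, hget⟩ := Option.isSome_iff_exists.mp hcont
    rw [hget]
    dsimp only
    have hv : v = ((fmWin cs m (i + 1)).count cs[i - m] : Int) + 1 := by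
      have := hinv1'.2.1 cs[i - m]
      rw [PySem.Dict.getD_eq_get?_getD, hget, List.count_cons_self] at this
      push_cast at this
      simpa using this
    rw [PySem.Dict.getD_insert_self]
    by_cases hct : v - 1 = 0
    · -- count dropped to 0: popped
      rw [if_pos hct]
      have hnotmem : cs[i - m] ∉ fmWin cs m (i + 1) := by
        rw [← List.count_eq_zero]; omega
      have hnd1 : freq1.keys.Nodup := by
        rw [hfreq1, PySem.Dict.keys_modify]
        exact PySem.Dict.nodup_keys_insert _ _ _ hinv.1
      refine ⟨_, ⟨?_, ?_, ?_⟩, rfl⟩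
      · exact dict_nodup_keys_erase _ _ (PySem.Dict.nodup_keys_insert _ _ _ hnd1)
      · intro c
        rw [dict_getD_erase]
        by_cases hc : c = cs[i - m]
        · rw [if_pos hc, hc]
          rw [← List.count_eq_zero] at hnotmem
          omega
        · rw [if_neg hc, PySem.Dict.getD_insert, if_neg hc, hinv1'.2.1 c,
              List.count_cons, if_neg (by simpa using Ne.symm hc)]
          push_cast; ring
      · intro c
        rw [dict_contains_erase]
        by_cases hc : c = cs[i - m]
        · subst hc
          simp only [ne_eq, not_true_eq_false, false_and, false_iff]
          exact hnotmem
        · rw [PySem.Dict.contains_insert]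
          have := hinv1'.2.2 c
          rw [List.mem_cons] at this
          simp [hc, this]
    · -- count still positive: kept with decremented value
      rw [if_neg hct]
      have hmem2 : cs[i - m] ∈ fmWin cs m (i + 1) := by
        rw [← List.count_pos_iff]; omega
      have hnd1 : freq1.keys.Nodup := by
        rw [hfreq1, PySem.Dict.keys_modify]
        exact PySem.Dict.nodup_keys_insert _ _ _ hinv.1
      refine ⟨_, ⟨?_, ?_, ?_⟩, rfl⟩
      · exact PySem.Dict.nodup_keys_insert _ _ _ hnd1
      · intro c
        by_cases hc : c = cs[i - m]
        · rw [hc, PySem.Dict.getD_insert_self]; omega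
        · rw [PySem.Dict.getD_insert, if_neg hc, hinv1'.2.1 c,
              List.count_cons, if_neg (by simpa using Ne.symm hc)]
          push_cast; ring
      · intro c
        rw [PySem.Dict.contains_insert]
        by_cases hc : c = cs[i - m]
        · subst hc; simp [hmem2]
        · have := hinv1'.2.2 c
          rw [List.mem_cons] at this
          simp [hc, this]
  · -- window still growing: nothing dropped
    have him : i + 1 ≤ m := by omega
    rw [if_neg hcase]
    dsimp only
    exact ⟨_, by rw [fmWin_small cs m i him hi]; exact hinv1, rfl⟩

-- One step of B's search when the window is full.
theorem fmB_step (cs : List Char) (u : Int) (m : Nat) (hm : 1 ≤ m) (hu : u = (m : Int))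
    (i : Nat) (hm1 : m - 1 ≤ i) (hi : i < cs.length) :
    fmB cs u i m =
      (if ((PySem.Set.ofList (fmWin cs m (i + 1))).length : Int) = u then (i : Int) + 1
       else fmB cs u (i + 1) m) := by
  unfold fmB
  have hmax : max (m - 1) i = i := by omega
  have hmax2 : ((max (m - 1) (i + 1) : Nat) : Int) = (i : Int) + 1 := by push_cast; omega
  rw [hmax]
  rw [PySem.List.pyRange_one_cons (by push_cast; omega)]
  rw [List.find?_cons]
  have hslice : PySem.List.slice cs (some ((i : Nat) - u + 1)) (some ((i : Nat) + 1)) =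
      fmWin cs m (i + 1) := by
    have h1 : ((i : Nat) : Int) - u + 1 = ((i + 1 - m : Nat) : Int) := by rw [hu]; omega
    have h2 : ((i : Nat) : Int) + 1 = ((i + 1 : Nat) : Int) := by push_cast; ring
    rw [h1, h2, PySem.List.slice_natCast, fmWin_eq_slice cs m i (by omega)]
    congr 1
    omega
  by_cases hcond : ((PySem.Set.ofList (fmWin cs m (i + 1))).length : Int) = u
  · have hpred : (((PySem.Set.ofList (PySem.List.slice cs (some (((i : Nat) : Int)
        - u + 1)) (some (((i : Nat) : Int) + 1)))).length : Int) == u) = true := by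
      rw [hslice]; exact beq_iff_eq.mpr hcond
    rw [hpred, if_pos hcond]
  · have hpred : (((PySem.Set.ofList (PySem.List.slice cs (some (((i : Nat) : Int)
        - u + 1)) (some (((i : Nat) : Int) + 1)))).length : Int) == u) = false := by
      rw [hslice]; exact beq_eq_false_iff_ne.mpr hcond
    rw [hpred, if_neg hcond, hmax2]

-- A bound: fewer than m characters can never show m distinct ones.
theorem fmB_size_small (cs : List Char) (u : Int) (m : Nat) (hu : u = (m : Int))
    (i : Nat) (hsm : i + 1 < m) :
    ¬ (((PySem.Set.ofList (fmWin cs m (i + 1))).length : Int) = u) := by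
  have h1 : (fmWin cs m (i + 1)).length ≤ i + 1 := by
    unfold fmWin
    calc ((cs.take (i + 1)).drop (i + 1 - m)).length
        = (cs.take (i + 1)).length - (i + 1 - m) := by rw [List.length_drop]
      _ ≤ (cs.take (i + 1)).length := Nat.sub_le _ _
      _ ≤ i + 1 := List.length_take_le _ _
  have h2 := set_ofList_length_le (fmWin cs m (i + 1))
  omega

theorem pyRange_nil' (a b : Int) (h : b ≤ a) : PySem.List.pyRange a b = [] := by
  simp [pysem, h]

theorem fmLoop_eq (cs : List Char) (u : Int) (m : Nat) (hm : 1 ≤ m) (hu : u = (m : Int)) :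
    ∀ (k i : Nat) (freq : PySem.Dict Char Int), cs.length - i ≤ k →
      fmInv (fmWin cs m i) freq →
      firstMarkerLoopA cs u i freq = fmB cs u i m := by
  have hdone : ∀ (i : Nat) (freq : PySem.Dict Char Int), ¬ i < cs.length →
      firstMarkerLoopA cs u i freq = fmB cs u i m := by
    intro i freq hi
    rw [firstMarkerLoopA, dif_neg hi]
    unfold fmB
    have hba : (cs.length : Int) ≤ ((max (m - 1) i : Nat) : Int) := by
      have : cs.length ≤ max (m - 1) i := by omega
      exact_mod_cast this
    rw [pyRange_nil' _ _ hba]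
    rfl
  intro k
  induction k with
  | zero =>
    intro i freq hk _hinv
    exact hdone i freq (by omega)
  | succ k ih =>
    intro i freq hk hinv
    by_cases hi : i < cs.length
    · obtain ⟨f, hinvf, hstep⟩ := fmA_step cs u m hm hu i freq hi hinv
      rw [hstep, fmInv_size _ _ hinvf]
      by_cases hfull : m - 1 ≤ i
      · rw [fmB_step cs u m hm hu i hfull hi]
        by_cases hcond : ((PySem.Set.ofList (fmWin cs m (i + 1))).length : Int) = u
        · rw [if_pos hcond, if_pos hcond]
        · rw [if_neg hcond, if_neg hcond]
          exact ih (i + 1) f (by omega) hinvf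
      · have hsm : i + 1 < m := by omega
        rw [if_neg (fmB_size_small cs u m hu i hsm)]
        have hBsame : fmB cs u i m = fmB cs u (i + 1) m := by
          unfold fmB
          rw [show max (m - 1) i = max (m - 1) (i + 1) from by omega]
        rw [hBsame]
        exact ih (i + 1) f (by omega) hinvf
    · exact hdone i freq hi

theorem fmB_zero (line : String) (u : Int) (m : Nat) (hm : 1 ≤ m) (hu : u = (m : Int)) :
    fmB line.toList u 0 m = first_marker_alt line u := by
  unfold fmB first_marker_alt
  rw [show ((max (m - 1) 0 : Nat) : Int) = u - 1 from by rw [hu]; omega]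

-- ===== VERDICT (by name: the statement is the Claim_ definition above) =====
theorem first_marker_spec : Claim_equal_first_marker := by
  intro line u _hdom hpre
  unfold Spec_first_marker
  have hm : 1 ≤ u.toNat := by unfold Pre_first_marker at hpre; omega
  have hu : u = (u.toNat : Int) := by unfold Pre_first_marker at hpre; omega
  have h0 : fmInv (fmWin line.toList u.toNat 0) PySem.Dict.empty := by
    refine ⟨PySem.Dict.nodup_keys_empty, ?_, ?_⟩ <;> intro c <;>
      simp [fmWin, PySem.Dict.getD_empty, PySem.Dict.contains_empty]
  have h := fmLoop_eq line.toList u u.toNat hm hu line.toList.length 0 PySem.Dict.empty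
    (by omega) h0
  unfold first_marker
  rw [h, fmB_zero line u u.toNat hm hu]
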